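-- pv_equiv track=rewrite | github.com/joaofranciscoxd/response | scrapper/scrapper_bot.py | exclude_archived_facts
-- ===== SOURCE A (Python) =====
-- def exclude_archived_facts(facts):
--     '''
--     Excludes the archived facts from the list of facts
--     and returns the filtered list.
--     '''
--     facts_data = []
--     found_archive = False
--     for fact in facts:
--         if found_archive:
--             break
--         if 'Archive' in fact['content']:
--             found_archive = True
--         else:
--             facts_data.append(fact)
--     return facts_data
-- ===== SOURCE B (Python) =====
-- def exclude_archived_facts(facts):
--     '''
--     Excludes the archived facts from the list of facts
--     and returns the filtered list.
--     '''
--     facts = list(facts)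
--     idx = next((i for i, f in enumerate(facts) if 'Archive' in f['content']),
--                len(facts))
--     return list(facts[:idx])
-- ===== Notes on version B (the rewrite author's own statement) =====
-- stated objective: idiomatic
-- what changed: Replaces the flag-and-break accumulating loop with a locate-the-first-marker pass (next over enumerate) followed by a slice of the prefix.
import Mathlib
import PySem

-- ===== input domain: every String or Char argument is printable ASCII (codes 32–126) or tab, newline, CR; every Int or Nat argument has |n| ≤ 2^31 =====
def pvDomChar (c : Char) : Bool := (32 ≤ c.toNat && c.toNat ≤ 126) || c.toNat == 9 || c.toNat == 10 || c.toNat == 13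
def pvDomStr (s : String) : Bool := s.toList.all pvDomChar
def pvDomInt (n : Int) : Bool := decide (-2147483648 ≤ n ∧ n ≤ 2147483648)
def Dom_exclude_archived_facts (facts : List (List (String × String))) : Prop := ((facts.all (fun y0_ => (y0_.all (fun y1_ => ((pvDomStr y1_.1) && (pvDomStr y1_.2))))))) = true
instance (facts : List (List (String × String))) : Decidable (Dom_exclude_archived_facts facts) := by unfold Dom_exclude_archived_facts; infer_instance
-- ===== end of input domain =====

-- B changes the decomposition only (find the first marker, then slice the prefix); same cost.
-- Shared marker test: fact['content'] contains 'Archive' (false when the key is absent — such inputs are outside Pre_).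
def pvHasArchive (fact : List (String × String)) : Bool :=
  match PySem.Dict.get? (PySem.Dict.mk fact) "content" with
  | some c => PySem.Str.isIn "Archive" c
  | none => false

-- ===== PORT A =====
-- the loop: accumulator facts_data, flag found_archive; 'break' at the top of the next iteration
def pvLoopA (facts : List (List (String × String))) (acc : List (List (String × String))) (found : Bool) : List (List (String × String)) :=
  match facts with
  | [] => acc
  | fact :: rest =>
      if found then acc
      else
        match PySem.Dict.get? (PySem.Dict.mk fact) "content" with
        | none => acc  -- KeyError in Python: outside Pre_
        | some c =>
            if PySem.Str.isIn "Archive" c then pvLoopA rest acc true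
            else pvLoopA rest (acc ++ [fact]) false

def exclude_archived_facts (facts : List (List (String × String))) : List (List (String × String)) :=
  pvLoopA facts [] false

-- ===== PORT B =====
-- idx = next((i for i,f in enumerate(facts) if 'Archive' in f['content']), len(facts)); return facts[:idx]
def exclude_archived_facts_alt (facts : List (List (String × String))) : List (List (String × String)) :=
  facts.take (facts.findIdx pvHasArchive)

-- ===== PRECONDITION & SPEC =====
-- Every fact up to and including the first 'Archive' marker must carry the 'content' key
-- (a fact before the marker lacking it makes A — and B — raise KeyError); facts after the marker are never read.
def Pre_exclude_archived_facts (facts : List (List (String × String))) : Prop :=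
  ∀ f ∈ facts.takeWhile (fun f => !pvHasArchive f), (PySem.Dict.get? (PySem.Dict.mk f) "content").isSome
instance (facts : List (List (String × String))) : Decidable (Pre_exclude_archived_facts facts) := by unfold Pre_exclude_archived_facts; infer_instance

def pvWitness_exclude_archived_facts : (List (List (String × String))) := [[("content", "x")], [("content", "Archive")], [("other", "y")]]

def Spec_exclude_archived_facts (facts : List (List (String × String))) (out : List (List (String × String))) : Prop := out = exclude_archived_facts_alt facts
instance (facts : List (List (String × String))) (out : List (List (String × String))) : Decidable (Spec_exclude_archived_facts facts out) := by unfold Spec_exclude_archived_facts; infer_instance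

-- ===== CLAIM (what is proved, stated in full; the proofs are below) =====
def Claim_equal_exclude_archived_facts : Prop := ∀ (facts : List (List (String × String))), Dom_exclude_archived_facts facts → Pre_exclude_archived_facts facts → Spec_exclude_archived_facts facts (exclude_archived_facts facts)

-- ===== LEMMAS AND PROOFS =====
lemma pvLoopA_found (facts : List (List (String × String))) (acc : List (List (String × String))) :
    pvLoopA facts acc true = acc := by
  cases facts <;> simp [pvLoopA]

lemma pvLoopA_eq : ∀ (facts acc : List (List (String × String))),
    Pre_exclude_archived_facts facts →
    pvLoopA facts acc false = acc ++ facts.take (facts.findIdx pvHasArchive)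
  | [], acc, _ => by simp [pvLoopA]
  | fact :: rest, acc, h => by
    by_cases hA : pvHasArchive fact = true
    · rcases hg : PySem.Dict.get? (PySem.Dict.mk fact) "content" with _ | c
      · simp [pvHasArchive, hg] at hA
      · have hc : PySem.Chars.isIn ['A','r','c','h','i','v','e'] c.toList = true := by
          simpa [pvHasArchive, hg] using hA
        simp [pvLoopA, hg, hA, List.findIdx_cons, pvLoopA_found, hc]
    · have hf : fact ∈ (fact :: rest).takeWhile (fun f => !pvHasArchive f) := by
        simp [hA]
      have hk := h fact hf
      rcases hg : PySem.Dict.get? (PySem.Dict.mk fact) "content" with _ | c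
      · simp [hg] at hk
      · have hc : pvHasArchive fact = false := Bool.eq_false_iff.mpr hA
        simp [pvHasArchive, hg] at hc
        have hrest : Pre_exclude_archived_facts rest := by
          intro f hfm
          exact h f (by simpa [List.takeWhile_cons, hA] using List.mem_cons_of_mem _ hfm)
        simp [pvLoopA, hg, hc, List.findIdx_cons, hA, pvLoopA_eq rest (acc ++ [fact]) hrest,
          List.take_succ_cons]
    termination_by facts => facts.length

-- ===== VERDICT (by name: the statement is the Claim_ definition above) =====
theorem exclude_archived_facts_spec : Claim_equal_exclude_archived_facts := by
  intro facts _ hpre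
  unfold Spec_exclude_archived_facts exclude_archived_facts exclude_archived_facts_alt
  simpa using pvLoopA_eq facts [] hpre
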